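-- pv_equiv track=rewrite | github.com/ADScanPro/adscan | adscan_internal/services/identity_risk_service.py | _recursive_group_labels
-- ===== SOURCE A (Python) =====
-- def _canonical_membership_label(domain: str, value: str) -> str:
--     raw = str(value or "").strip()
--     if not raw:
--         return ""
--     if "@" in raw:
--         left, _, right = raw.partition("@")
--         if left and right:
--             return f"{left.strip().upper()}@{right.strip().upper()}"
--     return f"{raw.upper()}@{str(domain or '').strip().upper()}"
--
-- def _recursive_group_labels(
--     domain: str,
--     direct_groups: list[str],
--     group_to_parents: dict[str, list[str]],
-- ) -> set[str]:
--     """Return direct + recursive parent groups for one principal."""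
--     resolved: set[str] = set()
--     stack = [_canonical_membership_label(domain, group) for group in direct_groups]
--     while stack:
--         current = stack.pop()
--         if not current or current in resolved:
--             continue
--         resolved.add(current)
--         for parent in group_to_parents.get(current, []):
--             canonical = _canonical_membership_label(domain, parent)
--             if canonical and canonical not in resolved:
--                 stack.append(canonical)
--     return resolved
-- ===== SOURCE B (Python) =====
-- def _canonical_membership_label(domain: str, value: str) -> str:
--     raw = str(value or "").strip()
--     if not raw:
--         return ""
--     if "@" in raw:
--         left, _, right = raw.partition("@")
--         if left and right:
--             return f"{left.strip().upper()}@{right.strip().upper()}"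
--     return f"{raw.upper()}@{str(domain or '').strip().upper()}"
--
--
-- def _recursive_group_labels(
--     domain: str,
--     direct_groups: list[str],
--     group_to_parents: dict[str, list[str]],
-- ) -> set[str]:
--     """Return direct + recursive parent groups for one principal.
--
--     Recursive decomposition: one shared `resolved` set and a recursive
--     `visit` helper instead of an explicit work stack.  We recurse in LIFO
--     order (reversed seeds / reversed parent lists); the order is irrelevant
--     to the returned set.
--     """
--     resolved: set[str] = set()
--
--     def visit(label: str) -> None:
--         if not label or label in resolved:
--             return
--         resolved.add(label)
--         for parent in reversed(group_to_parents.get(label, [])):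
--             visit(_canonical_membership_label(domain, parent))
--
--     for group in reversed(direct_groups):
--         visit(_canonical_membership_label(domain, group))
--     return resolved
-- ===== Notes on version B (the rewrite author's own statement) =====
-- stated objective: alternative
-- what changed: Replaces A's explicit work-stack while-loop with a recursive visit(label) helper that shares one resolved set and recurses through canonical parent labels (seeds and parent lists walked in LIFO order, which is irrelevant to the returned set).
import Mathlib
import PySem

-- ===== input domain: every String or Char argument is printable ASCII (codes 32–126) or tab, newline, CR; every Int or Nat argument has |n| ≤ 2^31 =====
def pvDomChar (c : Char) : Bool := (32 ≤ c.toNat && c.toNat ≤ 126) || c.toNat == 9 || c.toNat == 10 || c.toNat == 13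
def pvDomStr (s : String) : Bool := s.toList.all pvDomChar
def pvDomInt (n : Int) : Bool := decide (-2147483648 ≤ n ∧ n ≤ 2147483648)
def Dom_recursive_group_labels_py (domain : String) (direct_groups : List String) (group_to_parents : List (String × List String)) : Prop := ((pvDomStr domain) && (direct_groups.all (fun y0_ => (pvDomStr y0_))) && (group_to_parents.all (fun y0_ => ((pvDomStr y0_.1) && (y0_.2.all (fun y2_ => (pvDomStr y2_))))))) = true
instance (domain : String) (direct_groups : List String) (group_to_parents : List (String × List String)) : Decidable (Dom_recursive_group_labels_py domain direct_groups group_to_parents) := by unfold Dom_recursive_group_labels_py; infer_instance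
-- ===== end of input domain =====

-- B replaces A's explicit work stack with a recursive visit helper sharing one resolved
-- set (recursing in LIFO order); alternative decomposition, same cost, same result.


-- ===== PORT A =====
-- _canonical_membership_label, shared verbatim by both Pythons (B keeps it unchanged).
-- raw.partition("@") for the one-char separator "@" is ported by hand as
-- takeWhile/dropWhile at the first '@' (exact: partition splits at the first occurrence).
def canonChars (domain : List Char) (value : List Char) : List Char :=
  let raw := PySem.Chars.strip value          -- str(value or "").strip()
  if raw = [] then []                          -- if not raw: return ""
  else
    let left := raw.takeWhile (fun c => c ≠ '@')
    let rest := raw.dropWhile (fun c => c ≠ '@')   -- "@" in raw  ↔  rest ≠ []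
    if rest ≠ [] ∧ left ≠ [] ∧ rest.tail ≠ [] then
      PySem.Chars.upper (PySem.Chars.strip left) ++ '@' :: PySem.Chars.upper (PySem.Chars.strip rest.tail)
    else
      PySem.Chars.upper raw ++ '@' :: PySem.Chars.upper (PySem.Chars.strip domain)

def canonLabel (domain value : String) : String :=
  String.ofList (canonChars domain.toList value.toList)

-- the while-stack loop of A; the Python list used as a stack (append/pop at the END)
-- is represented head-as-top, so pop = uncons and pushing the parents in order is a
-- foldl that conses each pushed label.  Fuel is a provable upper bound on the number
-- of loop iterations (each pop consumes one unit); with the fuel A's port is given it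
-- is never exhausted (proved in the lemmas below).
def loopA (domain : String) (gp : List (String × List String)) :
    Nat → PySem.Set String → List String → PySem.Set String
  | 0, resolved, _ => resolved
  | _ + 1, resolved, [] => resolved
  | f + 1, resolved, current :: rest =>
    if current = "" ∨ PySem.Set.contains resolved current then
      loopA domain gp f resolved rest
    else
      let resolved' := PySem.Set.add resolved current
      -- group_to_parents.get(current, []): first-match lookup in the assoc list
      loopA domain gp f resolved'
        (((List.lookup current gp).getD []).foldl
          (fun st p =>
            let cp := canonLabel domain p
            if cp ≠ "" ∧ ¬ PySem.Set.contains resolved' cp then cp :: st else st)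
          rest)

def recursive_group_labels_py (domain : String) (direct_groups : List String) (group_to_parents : List (String × List String)) : List String :=
  loopA domain group_to_parents
    (direct_groups.length + (group_to_parents.map (fun kv => kv.2.length)).sum + 1)
    PySem.Set.empty
    ((direct_groups.map (fun g => canonLabel domain g)).reverse)

-- ===== PORT B =====
-- the recursive visit helper of Source B; fuel bounds the recursion DEPTH (each level of
-- recursion marks one fresh key of group_to_parents as resolved, so gp.length + 1
-- levels always suffice — proved below).
def visitB (domain : String) (gp : List (String × List String)) :
    Nat → PySem.Set String → String → PySem.Set String
  | 0, resolved, _ => resolved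
  | f + 1, resolved, label =>
    if label = "" ∨ PySem.Set.contains resolved label then resolved
    else
      (((List.lookup label gp).getD []).reverse).foldl
        (fun acc p => visitB domain gp f acc (canonLabel domain p))
        (PySem.Set.add resolved label)

def recursive_group_labels_py_alt (domain : String) (direct_groups : List String) (group_to_parents : List (String × List String)) : List String :=
  (direct_groups.reverse).foldl
    (fun acc g => visitB domain group_to_parents (group_to_parents.length + 1) acc (canonLabel domain g))
    PySem.Set.empty

-- ===== PRECONDITION & SPEC =====
def Spec_recursive_group_labels_py (domain : String) (direct_groups : List String) (group_to_parents : List (String × List String)) (out : List String) : Prop := out = recursive_group_labels_py_alt domain direct_groups group_to_parents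
instance (domain : String) (direct_groups : List String) (group_to_parents : List (String × List String)) (out : List String) : Decidable (Spec_recursive_group_labels_py domain direct_groups group_to_parents out) := by unfold Spec_recursive_group_labels_py; infer_instance

-- ===== CLAIM (what is proved, stated in full; the proofs are below) =====
def Claim_equal_recursive_group_labels_py : Prop := ∀ (domain : String) (direct_groups : List String) (group_to_parents : List (String × List String)), Dom_recursive_group_labels_py domain direct_groups group_to_parents → Spec_recursive_group_labels_py domain direct_groups group_to_parents (recursive_group_labels_py domain direct_groups group_to_parents)

-- ===== LEMMAS AND PROOFS =====

-- entries of gp whose key is not yet resolved (counted with multiplicity)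
def keysNotIn (gp : List (String × List String)) (R : List String) : Nat :=
  gp.countP (fun kv => !(PySem.Set.contains R kv.1))

-- total length of the parent lists of not-yet-resolved entries
def budget (gp : List (String × List String)) (R : List String) : Nat :=
  ((gp.filter (fun kv => !(PySem.Set.contains R kv.1))).map (fun kv => kv.2.length)).sum

theorem contains_iff {R : List String} {x : String} :
    PySem.Set.contains R x = true ↔ x ∈ R := by
  simp [PySem.Set.contains]

theorem contains_false_iff {R : List String} {x : String} :
    PySem.Set.contains R x = false ↔ x ∉ R := by
  rw [← Bool.not_eq_true, not_iff_not]; exact contains_iff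

theorem lookup_mem : ∀ (gp : List (String × List String)) (c : String) (v : List String),
    List.lookup c gp = some v → (c, v) ∈ gp := by
  intro gp c v h
  induction gp with
  | nil => simp [List.lookup] at h
  | cons kv tl ih =>
    obtain ⟨k, w⟩ := kv
    by_cases hk : c = k
    · simp [List.lookup, hk] at h
      exact List.mem_cons.mpr (Or.inl (by simp [hk, ← h]))
    · simp only [List.lookup, beq_eq_false_iff_ne, ne_eq,
        (beq_eq_false_iff_ne (a := c) (b := k)).mpr hk] at h
      exact List.mem_cons_of_mem _ (ih h)

theorem not_skip {R : List String} {l : String}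
    (h : ¬(l = "" ∨ PySem.Set.contains R l = true)) :
    PySem.Set.contains R l = false ∧ l ∉ R ∧ PySem.Set.add R l = R ++ [l] := by
  have h2 := not_or.mp h
  have hc : PySem.Set.contains R l = false := by
    cases hb : PySem.Set.contains R l
    · rfl
    · exact absurd hb h2.2
  have hnm : l ∉ R := contains_false_iff.mp hc
  exact ⟨hc, hnm, by simp [PySem.Set.add, hnm]⟩

-- strict countP decrease: one element satisfies p but not q, and q implies p
theorem countP_strict {α : Type} (p q : α → Bool) :
    ∀ (l : List α), (∀ a ∈ l, q a = true → p a = true) →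
    ∀ x ∈ l, p x = true → q x = false → l.countP q < l.countP p := by
  intro l
  induction l with
  | nil => intro _ x hx; cases hx
  | cons a tl ih =>
    intro himp x hx hp hq
    rcases List.mem_cons.mp hx with rfl | hxtl
    · have hmono : tl.countP q ≤ tl.countP p :=
        List.countP_mono_left (fun a ha => himp a (List.mem_cons_of_mem _ ha))
      simp [List.countP_cons, hq, hp]; omega
    · have := ih (fun a ha => himp a (List.mem_cons_of_mem _ ha)) x hxtl hp hq
      by_cases hqa : q a = true
      · have hpa := himp a List.mem_cons_self hqa
        simp [List.countP_cons, hqa, hpa]; omega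
      · simp [List.countP_cons, Bool.of_not_eq_true hqa]
        rcases Bool.eq_false_or_eq_true (p a) with h | h <;> simp [h] <;> omega

theorem keysNotIn_mono (gp : List (String × List String)) {R R' : List String}
    (h : ∀ x ∈ R, x ∈ R') : keysNotIn gp R' ≤ keysNotIn gp R :=
  List.countP_mono_left (by
    intro kv _ hk
    simp only [Bool.not_eq_true'] at hk
    simp only [Bool.not_eq_eq_eq_not, Bool.not_true, contains_false_iff]
    exact fun m => (contains_false_iff.mp hk) (h _ m))

theorem keysNotIn_step (gp : List (String × List String)) (R : List String) (c : String)
    (v : List String) (hmem : (c, v) ∈ gp) (hc : c ∉ R) :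
    keysNotIn gp (R ++ [c]) < keysNotIn gp R := by
  apply countP_strict _ _ gp
  · intro kv _ hk
    simp only [Bool.not_eq_true'] at hk
    simp only [Bool.not_eq_eq_eq_not, Bool.not_true, contains_false_iff]
    exact fun m => (contains_false_iff.mp hk) (List.mem_append_left _ m)
  · exact hmem
  · simp [contains_false_iff]; exact hc
  · simp [contains_iff.mpr (List.mem_append_right _ (List.mem_singleton.mpr rfl))]

theorem keysNotIn_lt_length (gp : List (String × List String)) (R : List String)
    (c : String) (v : List String) (hmem : (c, v) ∈ gp) (hc : c ∈ R) :
    keysNotIn gp R < gp.length := by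
  have := countP_strict (fun _ => true) (fun kv => !(PySem.Set.contains R kv.1)) gp
    (by intro a _ _; rfl) (c, v) hmem rfl
    (by simp [hc])
  calc keysNotIn gp R < gp.countP (fun _ => true) := this
    _ = gp.length := by rw [List.countP_true]

-- visitB only appends to the resolved set
theorem foldB_prefix (domain : String) (gp : List (String × List String)) (f : Nat)
    (ih : ∀ (R : List String) (l : String), ∃ t, visitB domain gp f R l = R ++ t) :
    ∀ (ps : List String) (R0 : List String),
      ∃ t, ps.foldl (fun acc p => visitB domain gp f acc (canonLabel domain p)) R0 = R0 ++ t := by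
  intro ps
  induction ps with
  | nil => exact fun R0 => ⟨[], by simp⟩
  | cons p tl ihp =>
    intro R0
    obtain ⟨t1, h1⟩ := ih R0 (canonLabel domain p)
    obtain ⟨t2, h2⟩ := ihp (visitB domain gp f R0 (canonLabel domain p))
    exact ⟨t1 ++ t2, by rw [List.foldl_cons, h2, h1, List.append_assoc]⟩

theorem visitB_prefix (domain : String) (gp : List (String × List String)) :
    ∀ (f : Nat) (R : List String) (l : String), ∃ t, visitB domain gp f R l = R ++ t := by
  intro f
  induction f with
  | zero => exact fun R l => ⟨[], by simp only [visitB, List.append_nil]⟩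
  | succ f ih =>
    intro R l
    by_cases h : l = "" ∨ PySem.Set.contains R l
    · exact ⟨[], by simp only [visitB, if_pos h, List.append_nil]⟩
    · obtain ⟨t, ht⟩ := foldB_prefix domain gp f ih (((List.lookup l gp).getD []).reverse)
        (PySem.Set.add R l)
      refine ⟨l :: t, ?_⟩
      simp only [visitB, if_neg h]
      rw [ht, (not_skip h).2.2]
      simp

theorem mem_visitB (domain : String) (gp : List (String × List String))
    (f : Nat) (R : List String) (l x : String) (hx : x ∈ R) : x ∈ visitB domain gp f R l := by
  obtain ⟨t, ht⟩ := visitB_prefix domain gp f R l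
  rw [ht]; exact List.mem_append_left _ hx

-- a fold of visitB with fuel f equals the same fold with fuel g, given pointwise equality
-- on every accumulator extending Rbase
theorem fold_congr {β : Type} (domain : String) (gp : List (String × List String))
    (f g : Nat) (Rbase : List String) (key : β → String) :
    ∀ (ps : List β) (R0 : List String), (∀ x ∈ Rbase, x ∈ R0) →
      (∀ (R' : List String), (∀ x ∈ Rbase, x ∈ R') → ∀ (l : String),
        visitB domain gp f R' l = visitB domain gp g R' l) →
      ps.foldl (fun acc p => visitB domain gp f acc (key p)) R0
        = ps.foldl (fun acc p => visitB domain gp g acc (key p)) R0 := by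
  intro ps
  induction ps with
  | nil => intro R0 _ _; rfl
  | cons p tl ih =>
    intro R0 hsub h
    have hhead := h R0 hsub (key p)
    simp only [List.foldl_cons, hhead]
    exact ih _ (fun x hx => mem_visitB _ _ _ _ _ _ (hsub x hx)) h

-- fuel irrelevance: any two fuels strictly above keysNotIn give the same result
theorem visitB_fuel (domain : String) (gp : List (String × List String)) :
    ∀ (n f g : Nat) (R : List String) (l : String),
      keysNotIn gp R ≤ n → keysNotIn gp R < f → keysNotIn gp R < g →
      visitB domain gp f R l = visitB domain gp g R l := by
  intro n
  induction n with
  | zero =>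
    intro f g R l hn hf hg
    obtain ⟨f', rfl⟩ : ∃ f', f = f' + 1 := ⟨f - 1, by omega⟩
    obtain ⟨g', rfl⟩ : ∃ g', g = g' + 1 := ⟨g - 1, by omega⟩
    by_cases h : l = "" ∨ PySem.Set.contains R l
    · simp only [visitB, if_pos h]
    · rw [visitB, visitB, if_neg h, if_neg h]
      rcases hps : (List.lookup l gp).getD [] with _ | ⟨p, ptl⟩
      · simp [hps]
      · exfalso
        obtain ⟨v, hv⟩ : ∃ v, List.lookup l gp = some v := by
          rcases hl : List.lookup l gp with _ | v
          · rw [hl] at hps; simp at hps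
          · exact ⟨v, rfl⟩
        have hcR : l ∉ R := fun m => h (Or.inr (contains_iff.mpr m))
        have := keysNotIn_step gp R l v (lookup_mem gp l v hv) hcR
        omega
  | succ n ihn =>
    intro f g R l hn hf hg
    obtain ⟨f', rfl⟩ : ∃ f', f = f' + 1 := ⟨f - 1, by omega⟩
    obtain ⟨g', rfl⟩ : ∃ g', g = g' + 1 := ⟨g - 1, by omega⟩
    by_cases h : l = "" ∨ PySem.Set.contains R l
    · simp only [visitB, if_pos h]
    · rw [visitB, visitB, if_neg h, if_neg h]
      rcases hps : (List.lookup l gp).getD [] with _ | ⟨p, ptl⟩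
      · simp [hps]
      · obtain ⟨v, hv⟩ : ∃ v, List.lookup l gp = some v := by
          rcases hl : List.lookup l gp with _ | v
          · rw [hl] at hps; simp at hps
          · exact ⟨v, rfl⟩
        have hcR : l ∉ R := fun m => h (Or.inr (contains_iff.mpr m))
        have hstep := keysNotIn_step gp R l v (lookup_mem gp l v hv) hcR
        have hadd : PySem.Set.add R l = R ++ [l] := (not_skip h).2.2
        apply fold_congr domain gp f' g' (R ++ [l]) (canonLabel domain)
        · intro x hx; rw [hadd] at *; exact hx
        · intro R' hsub l'
          have hKR' : keysNotIn gp R' ≤ keysNotIn gp (R ++ [l]) := keysNotIn_mono gp hsub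
          exact ihn f' g' R' l' (by omega) (by omega) (by omega)

-- dropping from a fold the labels that are empty or already resolved (w.r.t. a base
-- set below every accumulator) does not change the fold
theorem fold_filter (domain : String) (gp : List (String × List String))
    (Rbase : List String) (P : String → Bool)
    (hP : ∀ cp, P cp = false → cp = "" ∨ cp ∈ Rbase) :
    ∀ (M : List String) (R0 : List String), (∀ x ∈ Rbase, x ∈ R0) →
      M.foldl (fun acc c => visitB domain gp (gp.length + 1) acc c) R0
        = (M.filter P).foldl (fun acc c => visitB domain gp (gp.length + 1) acc c) R0 := by
  intro M
  induction M with
  | nil => intro R0 _; rfl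
  | cons m tl ih =>
    intro R0 hsub
    rcases hm : P m with hf | ht
    · have hskip : visitB domain gp (gp.length + 1) R0 m = R0 := by
        rcases hP m hm with rfl | hmem
        · simp only [visitB]
          simp
        · simp only [visitB, if_pos (Or.inr (contains_iff.mpr (hsub m hmem)))]
      simp only [List.foldl_cons, List.filter_cons, hm, hskip]
      exact ih R0 hsub
    · simp only [List.foldl_cons, List.filter_cons, hm]
      exact ih _ (fun x hx => mem_visitB _ _ _ _ _ _ (hsub x hx))

-- shape of the stack after A pushes the (filtered, canonicalised) parents
theorem push_fold_eq (domain : String) (R' : List String) :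
    ∀ (ps : List String) (rest : List String),
      ps.foldl (fun st p =>
          let cp := canonLabel domain p
          if cp ≠ "" ∧ ¬ PySem.Set.contains R' cp then cp :: st else st) rest
        = ((ps.map (canonLabel domain)).filter
            (fun cp => !(cp == "") && !(PySem.Set.contains R' cp))).reverse ++ rest := by
  intro ps
  induction ps with
  | nil => intro rest; simp
  | cons p tl ih =>
    intro rest
    simp only [List.foldl_cons, List.map_cons, List.filter_cons]
    by_cases hc : canonLabel domain p ≠ "" ∧ ¬ PySem.Set.contains R' (canonLabel domain p)
    · have h1 : (canonLabel domain p == "") = false := beq_eq_false_iff_ne.mpr hc.1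
      have h2 : PySem.Set.contains R' (canonLabel domain p) = false := by
        cases hcc : PySem.Set.contains R' (canonLabel domain p)
        · rfl
        · exact absurd hcc hc.2
      have hb : (!(canonLabel domain p == "") && !(PySem.Set.contains R' (canonLabel domain p))) = true := by
        rw [h1, h2]; rfl
      simp only [if_pos hc, hb, ih]
      simp
    · have hb : (!(canonLabel domain p == "") && !(PySem.Set.contains R' (canonLabel domain p))) = false := by
        rcases not_and_or.mp hc with h1 | h2
        · have he : canonLabel domain p = "" := not_not.mp h1
          simp [he]
        · have he : PySem.Set.contains R' (canonLabel domain p) = true := not_not.mp h2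
          rw [he]
          simp
      simp only [if_neg hc, hb, ih]
      simp

-- sums over filters: a stronger filter keeps no more
theorem sum_filter_le (p q : (String × List String) → Bool)
    (himp : ∀ kv, q kv = true → p kv = true) :
    ∀ (gp : List (String × List String)),
      ((gp.filter q).map (fun kv => kv.2.length)).sum
        ≤ ((gp.filter p).map (fun kv => kv.2.length)).sum := by
  intro gp
  induction gp with
  | nil => simp
  | cons kv tl ih =>
    simp only [List.filter_cons]
    cases hq : q kv
    · cases hp : p kv
      · simpa using ih
      · simp; omega
    · rw [himp kv hq]
      simp; omega

-- budget is monotone in the resolved set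
theorem budget_mono (gp : List (String × List String)) (R : List String) (c : String) :
    budget gp (R ++ [c]) ≤ budget gp R :=
  sum_filter_le _ _ (by
    intro kv hk
    simp only [Bool.not_eq_true'] at hk ⊢
    exact contains_false_iff.mpr
      (fun m => (contains_false_iff.mp hk) (List.mem_append_left _ m))) gp

-- unchanged label: membership in R ++ [c] is membership in R for keys other than c
theorem contains_append_ne (R : List String) (c k : String) (hk : k ≠ c) :
    PySem.Set.contains (R ++ [c]) k = PySem.Set.contains R k := by
  cases hcc : PySem.Set.contains R k
  · apply contains_false_iff.mpr
    intro hm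
    rcases List.mem_append.mp hm with h1 | h2
    · exact (contains_false_iff.mp hcc) h1
    · exact hk (List.mem_singleton.mp h2)
  · exact contains_iff.mpr (List.mem_append_left _ (contains_iff.mp hcc))

-- processing an unresolved label pays for the parents it can push
theorem budget_step : ∀ (gp : List (String × List String)) (R : List String) (c : String),
    c ∉ R → budget gp (R ++ [c]) + ((List.lookup c gp).getD []).length ≤ budget gp R := by
  intro gp
  induction gp with
  | nil => intro R c _; simp [budget, List.lookup]
  | cons kv tl ih =>
    intro R c hc
    obtain ⟨k, v⟩ := kv
    have hcR' : PySem.Set.contains (R ++ [c]) c = true :=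
      contains_iff.mpr (List.mem_append_right _ (List.mem_singleton.mpr rfl))
    by_cases hk : k = c
    · subst hk
      have hfR : PySem.Set.contains R k = false := contains_false_iff.mpr hc
      have hlook : List.lookup k (((k, v) : String × List String) :: tl) = some v := by
        simp [List.lookup]
      simp only [budget, List.filter_cons, hcR', hfR, hlook, Bool.not_true, Bool.not_false,
        Bool.false_eq_true, if_false, if_true, Option.getD_some, List.map_cons, List.sum_cons]
      have := budget_mono tl R k
      simp only [budget] at this
      omega
    · have hceq := contains_append_ne R c k hk
      have hlook : List.lookup c (((k, v) : String × List String) :: tl) = List.lookup c tl := by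
        have : (c == k) = false := beq_eq_false_iff_ne.mpr (fun e => hk e.symm)
        simp [List.lookup, this]
      have hih := ih R c hc
      simp only [budget, List.filter_cons, hceq, hlook]
      simp only [budget] at hih
      cases hcc : PySem.Set.contains R k
      · simp only [Bool.not_false, if_true, List.map_cons, List.sum_cons]
        omega
      · simp only [Bool.not_true, Bool.false_eq_true, if_false]
        omega

theorem loopA_eq_fold (domain : String) (gp : List (String × List String)) :
    ∀ (fA : Nat) (R : List String) (S : List String),
      S.length + budget gp R ≤ fA →
      loopA domain gp fA R S =
        S.foldl (fun acc c => visitB domain gp (gp.length + 1) acc c) R := by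
  intro fA
  induction fA with
  | zero =>
    intro R S h
    have hS : S = [] := List.eq_nil_of_length_eq_zero (by omega)
    subst hS
    simp only [loopA, List.foldl_nil]
  | succ fA ih =>
    intro R S h
    cases S with
    | nil => simp only [loopA, List.foldl_nil]
    | cons c rest =>
      simp only [loopA]
      by_cases hc : c = "" ∨ PySem.Set.contains R c
      · rw [if_pos hc]
        have hskip : visitB domain gp (gp.length + 1) R c = R := by
          simp only [visitB, if_pos hc]
        rw [List.foldl_cons, hskip]
        exact ih R rest (by simp only [List.length_cons] at h; omega)
      · rw [if_neg hc]
        have hns := not_skip hc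
        have hR' : PySem.Set.add R c = R ++ [c] := hns.2.2
        rw [push_fold_eq domain (PySem.Set.add R c) ((List.lookup c gp).getD []) rest]
        have hlenfil : ((((List.lookup c gp).getD []).map (canonLabel domain)).filter
            (fun cp => !(cp == "") && !(PySem.Set.contains (PySem.Set.add R c) cp))).length
            ≤ ((List.lookup c gp).getD []).length := le_trans
          (List.length_filter_le _ _) (by rw [List.length_map])
        have hbud : budget gp (R ++ [c]) + ((List.lookup c gp).getD []).length ≤ budget gp R :=
          budget_step gp R c hns.2.1
        rw [ih (PySem.Set.add R c) _ (by
          simp only [List.length_append, List.length_reverse, List.length_cons, hR'] at *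
          omega)]
        rw [List.foldl_append, List.foldl_cons]
        congr 1
        -- remains: fold of visitB over the pushed (filtered) labels = one visitB call
        rcases hps : (List.lookup c gp).getD [] with _ | ⟨p, ptl⟩
        · simp only [visitB, if_neg hc, hps]
          simp
        · obtain ⟨v, hv⟩ : ∃ v, List.lookup c gp = some v := by
            rcases hl : List.lookup c gp with _ | v
            · rw [hl] at hps; simp at hps
            · exact ⟨v, rfl⟩
          have hveq : (List.lookup c gp).getD [] = v := by rw [hv]; rfl
          have hkeymem : (c, v) ∈ gp := lookup_mem gp c v hv
          have hcmem : c ∈ PySem.Set.add R c := by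
            rw [hR']; exact List.mem_append_right _ (List.mem_singleton.mpr rfl)
          rw [← hps, hveq]
          simp only [visitB, if_neg hc, hv, Option.getD_some]
          have hfuel : (v.reverse).foldl
              (fun acc p => visitB domain gp gp.length acc (canonLabel domain p))
              (PySem.Set.add R c)
              = (v.reverse).foldl
              (fun acc p => visitB domain gp (gp.length + 1) acc (canonLabel domain p))
              (PySem.Set.add R c) := by
            apply fold_congr domain gp gp.length (gp.length + 1) (PySem.Set.add R c)
              (canonLabel domain) v.reverse (PySem.Set.add R c) (fun x hx => hx)
            intro R0 hsub l
            have h1 : keysNotIn gp R0 < gp.length :=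
              keysNotIn_lt_length gp R0 c v hkeymem (hsub c hcmem)
            exact visitB_fuel domain gp (keysNotIn gp R0) _ _ R0 l le_rfl h1 (by omega)
          rw [hfuel]
          have hmapfold : (v.reverse).foldl
              (fun acc p => visitB domain gp (gp.length + 1) acc (canonLabel domain p))
              (PySem.Set.add R c)
              = ((v.map (canonLabel domain)).reverse).foldl
              (fun acc cp => visitB domain gp (gp.length + 1) acc cp)
              (PySem.Set.add R c) := by
            rw [← List.map_reverse, List.foldl_map]
          rw [hmapfold]
          rw [← List.filter_reverse]
          exact (fold_filter domain gp (PySem.Set.add R c)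
            (fun cp => !(cp == "") && !(PySem.Set.contains (PySem.Set.add R c) cp))
            (by
              intro cp hcp
              rcases Bool.and_eq_false_iff.mp hcp with h1 | h2
              · exact Or.inl (by
                  have : (cp == "") = true := by
                    cases hcc : (cp == "")
                    · rw [hcc] at h1; exact absurd h1 (by simp)
                    · rfl
                  exact beq_iff_eq.mp this)
              · refine Or.inr (contains_iff.mp ?_)
                cases hcc : PySem.Set.contains (PySem.Set.add R c) cp
                · rw [hcc] at h2; exact absurd h2 (by simp)
                · rfl)
            ((v.map (canonLabel domain)).reverse) (PySem.Set.add R c) (fun x hx => hx)).symm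

theorem budget_empty (gp : List (String × List String)) :
    budget gp PySem.Set.empty = (gp.map (fun kv => kv.2.length)).sum := by
  simp [budget, PySem.Set.empty, PySem.Set.contains]

-- ===== VERDICT (by name: the statement is the Claim_ definition above) =====
theorem recursive_group_labels_py_spec : Claim_equal_recursive_group_labels_py := by
  intro domain direct_groups group_to_parents _
  unfold Spec_recursive_group_labels_py recursive_group_labels_py recursive_group_labels_py_alt
  rw [loopA_eq_fold domain group_to_parents _ _ _ (by
    rw [List.length_reverse, List.length_map, budget_empty]
    omega)]
  rw [← List.map_reverse, List.foldl_map]
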